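-- pv_equiv track=rewrite | github.com/ckf42/leetcode-code | sol/2221/2221.py | triangularSum
-- ===== SOURCE A (Python) =====
-- from typing import List
--
-- def triangularSum(nums: List[int]) -> int:
--     n = len(nums) - 1
--     coeff = 1
--     res = nums[0]
--     for i, x in enumerate(nums[1:]):
--         coeff = coeff * (n - i) // (i + 1)
--         res = (res + coeff % 10 * x) % 10
--     return res
-- ===== SOURCE B (Python) =====
-- from typing import List
--
-- def triangularSum(nums: List[int]) -> int:
--     arr = list(nums)
--     while len(arr) > 1:
--         arr = [(a + b) % 10 for a, b in zip(arr, arr[1:])]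
--     return arr[0]
-- ===== Notes on version B (the rewrite author's own statement) =====
-- stated objective: simpler
-- what changed: Replaces the one-pass binomial-coefficient accumulation (coeff = C(n,i) maintained by exact multiply/floor-divide) with the direct triangular reduction the problem describes: repeatedly replace the list by adjacent sums mod 10 until one element remains.
import Mathlib
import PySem

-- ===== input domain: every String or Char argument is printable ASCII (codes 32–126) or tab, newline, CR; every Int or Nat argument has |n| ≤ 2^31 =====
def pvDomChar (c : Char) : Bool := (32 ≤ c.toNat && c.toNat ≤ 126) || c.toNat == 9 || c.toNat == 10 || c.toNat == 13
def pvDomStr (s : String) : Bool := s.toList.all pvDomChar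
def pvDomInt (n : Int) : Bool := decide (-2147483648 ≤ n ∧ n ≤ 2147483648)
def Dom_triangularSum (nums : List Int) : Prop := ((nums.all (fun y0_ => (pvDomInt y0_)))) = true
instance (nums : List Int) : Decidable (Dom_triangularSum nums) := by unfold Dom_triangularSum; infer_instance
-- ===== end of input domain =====

-- B replaces A's one-pass binomial-coefficient accumulation with the direct
-- triangular reduction (repeated adjacent sums mod 10): simpler, no exact-division trick.


-- ===== PORT A =====
-- Literal port of A: n = len(nums)-1; coeff=1; res=nums[0]; for i,x in enumerate(nums[1:]):
-- coeff = coeff*(n-i)//(i+1); res = (res + coeff%10*x) % 10.  nums[0] raises on [] (Pre_ excludes []).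
def triangularSum (nums : List Int) : Int :=
  match nums with
  | [] => 0  -- nums[0] raises IndexError here; excluded by Pre_triangularSum
  | x :: tail =>
    let n : Int := (nums.length : Int) - 1
    ((PySem.List.enumerate tail).foldl
      (fun (s : Int × Int) (p : Int × Int) =>
        let coeff := PySem.Int.floordiv (s.1 * (n - p.1)) (p.1 + 1)
        (coeff, PySem.Int.mod (s.2 + PySem.Int.mod coeff 10 * p.2) 10))
      (1, x)).2

-- ===== PORT B =====
-- one comprehension step: [(a+b)%10 for a,b in zip(arr, arr[1:])]
def pvStep (arr : List Int) : List Int :=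
  List.zipWith (fun a b => PySem.Int.mod (a + b) 10) arr arr.tail

-- the while loop: while len(arr) > 1: arr = pvStep arr
def pvLoop (arr : List Int) : List Int :=
  if _h : 1 < arr.length then pvLoop (pvStep arr) else arr
termination_by arr.length
decreasing_by
  simp only [pvStep, List.length_zipWith, List.length_tail]
  omega

def triangularSum_alt (nums : List Int) : Int :=
  (pvLoop nums).headD 0  -- arr[0]; arr is nonempty whenever nums is (Pre_ excludes [])

-- ===== PRECONDITION & SPEC =====
-- Pre_ excludes only the empty list, on which both A and B raise IndexError (nums[0] / arr[0]).
def Pre_triangularSum (nums : List Int) : Prop := nums ≠ []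
instance (nums : List Int) : Decidable (Pre_triangularSum nums) := by unfold Pre_triangularSum; infer_instance
def pvWitness_triangularSum : List Int := [3, 7, 4]

def Spec_triangularSum (nums : List Int) (out : Int) : Prop := out = triangularSum_alt nums
instance (nums : List Int) (out : Int) : Decidable (Spec_triangularSum nums out) := by unfold Spec_triangularSum; infer_instance

-- ===== CLAIM (what is proved, stated in full; the proofs are below) =====
def Claim_equal_triangularSum : Prop := ∀ (nums : List Int), Dom_triangularSum nums → Pre_triangularSum nums → Spec_triangularSum nums (triangularSum nums)

-- ===== LEMMAS AND PROOFS =====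

-- Binomial-weighted sum: pvW n k [t0,…] = Σ C(n, k+j) * t_j.  The common value both ports compute mod 10.
def pvW (n k : Nat) : List Int → Int
  | [] => 0
  | a :: t => (n.choose k : Int) * a + pvW n (k + 1) t

-- A-side invariant: folding the tail from index k with coeff = C(n,k).
theorem foldA (n : Nat) (t : List Int) (ht : t ≠ []) :
    ∀ (k : Nat) (r : Int), k + t.length = n →
    ((PySem.List.enumerate t (k : Int)).foldl
      (fun (s : Int × Int) (p : Int × Int) =>
        let coeff := PySem.Int.floordiv (s.1 * ((n : Int) - p.1)) (p.1 + 1)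
        (coeff, PySem.Int.mod (s.2 + PySem.Int.mod coeff 10 * p.2) 10))
      ((n.choose k : Int), r)).2 = (r + pvW n (k + 1) t) % 10 := by
  induction t with
  | nil => exact absurd rfl ht
  | cons a t ih =>
    intro k r hk
    have hkn : k < n := by simp at hk; omega
    have hcoeff : PySem.Int.floordiv ((n.choose k : Int) * ((n : Int) - (k : Int))) ((k : Int) + 1) = (n.choose (k + 1) : Int) := by
      have hid : (n.choose k : Int) * ((n : Int) - (k : Int)) = (n.choose (k + 1) : Int) * ((k : Int) + 1) := by
        have h1 := Nat.choose_succ_right_eq n k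
        have hsub : ((n - k : Nat) : Int) = (n : Int) - (k : Int) := by
          push_cast [Nat.cast_sub hkn.le]; ring
        calc (n.choose k : Int) * ((n : Int) - (k : Int))
            = ((n.choose k * (n - k) : Nat) : Int) := by push_cast [hsub]; ring
          _ = ((n.choose (k + 1) * (k + 1) : Nat) : Int) := by rw [← h1]
          _ = (n.choose (k + 1) : Int) * ((k : Int) + 1) := by push_cast; ring
      rw [hid, PySem.Int.floordiv_eq_ediv_of_pos (by positivity)]
      exact Int.mul_ediv_cancel _ (by positivity)
    have hmodc : PySem.Int.mod ((n.choose (k+1) : Int)) 10 * a % 10 = ((n.choose (k+1) : Int)) * a % 10 := by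
      rw [PySem.Int.mod_eq_emod_of_pos (by norm_num), Int.mul_emod, Int.emod_emod_of_dvd _ dvd_rfl, ← Int.mul_emod]
    rw [PySem.List.enumerate_cons]
    simp only [List.foldl_cons]
    cases t with
    | nil =>
      simp only [PySem.List.enumerate_nil, List.foldl_nil, hcoeff, pvW, add_zero]
      rw [PySem.Int.mod_eq_emod_of_pos (by norm_num)]
      omega
    | cons b t' =>
      have hk' : (k + 1) + (b :: t').length = n := by simp at hk ⊢; omega
      have hrec := ih (by simp) (k + 1) (PySem.Int.mod (r + PySem.Int.mod ((n.choose (k+1) : Int)) 10 * a) 10) hk'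
      simp only [hcoeff] at *
      push_cast at hrec ⊢
      rw [hrec]
      simp only [pvW]
      rw [PySem.Int.mod_eq_emod_of_pos (by norm_num)]
      omega

-- A on a nonempty list with nonempty tail computes the binomial sum mod 10.
theorem triangularSum_eq_pvW (x : Int) (t : List Int) (ht : t ≠ []) :
    triangularSum (x :: t) = pvW t.length 0 (x :: t) % 10 := by
  have h := foldA t.length t ht 0 x (by omega)
  simp only [Nat.cast_zero, Nat.choose_zero_right, Nat.cast_one, zero_add] at h
  simp only [triangularSum, List.length_cons, pvW, Nat.choose_zero_right, Nat.cast_one, one_mul]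
  push_cast
  simp only [show ((t.length : Int) + 1 - 1) = (t.length : Int) by ring]
  exact h

-- Structure of one reduction step.
theorem pvStep_cons (a b : Int) (t : List Int) :
    pvStep (a :: b :: t) = PySem.Int.mod (a + b) 10 :: pvStep (b :: t) := by
  simp [pvStep]

theorem pvStep_length (arr : List Int) : (pvStep arr).length = arr.length - 1 := by
  simp [pvStep]

-- One reduction step preserves the binomial sum mod 10, with boundary corrections.
theorem pvStep_pvW (n : Nat) (a : Int) (t : List Int) :
    ∀ k, pvW n k (pvStep (a :: t)) % 10
      = ((n.choose k : Int) * a + pvW (n + 1) (k + 1) t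
         - (n.choose (k + t.length) : Int) * (t.getLastD a)) % 10 := by
  induction t generalizing a with
  | nil => intro k; simp [pvStep, pvW]
  | cons b t' ih =>
    intro k
    rw [pvStep_cons]
    simp only [pvW, List.length_cons, List.getLastD_cons]
    have hmod : (n.choose k : Int) * PySem.Int.mod (a + b) 10 % 10
        = ((n.choose k : Int) * (a + b)) % 10 := by
      rw [PySem.Int.mod_eq_emod_of_pos (by norm_num), Int.mul_emod, Int.emod_emod_of_dvd _ dvd_rfl, ← Int.mul_emod]
    have hih := ih b (k + 1)
    have pascal : ((n + 1).choose (k + 1) : Int) = (n.choose k : Int) + (n.choose (k + 1) : Int) := by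
      rw [Nat.choose_succ_succ]; push_cast; ring
    have key : (n.choose k : Int) * (a + b)
        + ((n.choose (k + 1) : Int) * b + pvW (n + 1) (k + 1 + 1) t'
           - (n.choose (k + 1 + t'.length) : Int) * t'.getLastD b)
        = (n.choose k : Int) * a + ((n + 1).choose (k + 1) : Int) * b + pvW (n + 1) (k + 1 + 1) t'
          - (n.choose (k + (t'.length + 1)) : Int) * t'.getLastD b := by
      have hidx : k + 1 + t'.length = k + (t'.length + 1) := by omega
      rw [pascal, hidx]; ring
    omega

-- Top-level step lemma: pvW (m-1) 0 (pvStep l) ≡ pvW m 0 l  (mod 10)  for l = a :: t, |t| = m ≥ 1.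
theorem pvStep_pvW_top (a : Int) (t : List Int) (ht : t ≠ []) :
    pvW (t.length - 1) 0 (pvStep (a :: t)) % 10 = pvW t.length 0 (a :: t) % 10 := by
  have h := pvStep_pvW (t.length - 1) a t 0
  have hlen : 1 ≤ t.length := by
    cases t with
    | nil => exact absurd rfl ht
    | cons b t' => simp
  have hn1 : t.length - 1 + 1 = t.length := by omega
  have hvanish : ((t.length - 1).choose (0 + t.length) : Int) = 0 := by
    rw [Nat.choose_eq_zero_of_lt (by omega)]; simp
  rw [h, hvanish, hn1]
  simp only [pvW, Nat.choose_zero_right, Nat.cast_one, one_mul, zero_mul, sub_zero]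

-- The whole loop: on a list of length ≥ 2 it returns the singleton [pvW (len-1) 0 l % 10].
theorem pvLoop_eq (l : List Int) (hl : 1 < l.length) :
    pvLoop l = [pvW (l.length - 1) 0 l % 10] := by
  generalize hm : l.length = m
  induction m using Nat.strong_induction_on generalizing l with
  | _ m ih =>
    subst hm
    rw [pvLoop, dif_pos hl]
    obtain ⟨a, t, rfl⟩ : ∃ a t, l = a :: t := by
      cases l with
      | nil => simp at hl
      | cons a t => exact ⟨a, t, rfl⟩
    have ht : t ≠ [] := by
      cases t with
      | nil => simp at hl
      | cons b t' => simp
    have hslen : (pvStep (a :: t)).length = t.length := by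
      rw [pvStep_length]; simp
    by_cases h2 : 1 < (pvStep (a :: t)).length
    · have hrec := ih (pvStep (a :: t)).length
        (by rw [hslen]; simp) (pvStep (a :: t)) h2 rfl
      rw [hrec, hslen]
      congr 1
      have htop := pvStep_pvW_top a t ht
      rw [htop]
      congr 2
    · -- pvStep has length 1: l = [a, b]
      rw [hslen] at h2
      obtain ⟨b, rfl⟩ : ∃ b, t = [b] := by
        cases t with
        | nil => exact absurd rfl ht
        | cons b t' =>
          cases t' with
          | nil => exact ⟨b, rfl⟩
          | cons c t'' => simp at h2
      rw [pvLoop]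
      norm_num [pvStep, pvW]

-- ===== VERDICT (by name: the statement is the Claim_ definition above) =====
theorem triangularSum_spec : Claim_equal_triangularSum := by
  intro nums _ hpre
  unfold Spec_triangularSum
  match nums, hpre with
  | x :: t, _ =>
    cases t with
    | nil =>
      simp [triangularSum, triangularSum_alt, pvLoop, PySem.List.enumerate_nil]
    | cons b t' =>
      rw [triangularSum_eq_pvW x (b :: t') (by simp)]
      unfold triangularSum_alt
      rw [pvLoop_eq (x :: b :: t') (by simp)]
      simp only [List.headD, List.length_cons]
      congr 3
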